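-- pv_equiv track=rewrite | github.com/Omcarr/DSA | diction.py | count_firstperson
-- ===== SOURCE A (Python) =====
-- def count_firstperson(text):
--     firstperson={
--      "i","me","my","myself","mine"
--      }
--     count=0
--     for i in text.split():
--         if i.lower() in firstperson:
--             count+=1
--
--     return count
-- ===== SOURCE B (Python) =====
-- def count_firstperson(text):
--     counts = {}
--     for w in text.split():
--         lw = w.lower()
--         counts[lw] = counts.get(lw, 0) + 1
--     return sum(counts.get(p, 0) for p in ("i", "me", "my", "myself", "mine"))
-- ===== Notes on version B (the rewrite author's own statement) =====
-- stated objective: alternative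
-- what changed: B builds a frequency table of all lowercased tokens in one pass and then sums the counts of the five pronouns by iterating over the pronoun tuple, instead of testing each token for set membership and incrementing a counter.
import Mathlib
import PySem

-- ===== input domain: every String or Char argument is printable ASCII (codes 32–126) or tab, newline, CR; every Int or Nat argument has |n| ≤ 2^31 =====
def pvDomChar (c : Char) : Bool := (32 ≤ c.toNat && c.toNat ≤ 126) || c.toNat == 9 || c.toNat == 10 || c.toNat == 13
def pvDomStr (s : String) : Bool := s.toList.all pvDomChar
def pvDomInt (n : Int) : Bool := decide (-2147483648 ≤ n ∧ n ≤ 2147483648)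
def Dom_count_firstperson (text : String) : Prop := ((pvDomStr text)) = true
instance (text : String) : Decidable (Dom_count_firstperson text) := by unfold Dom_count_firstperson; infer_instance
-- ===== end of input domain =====

-- B counts frequencies of all lowercased tokens once, then sums the five pronoun counts; same cost, different traversal (alternative).

-- ===== PORT A =====
def count_firstperson (text : String) : Int :=
  -- firstperson = {"i","me","my","myself","mine"}
  (PySem.Str.split₀ text).foldl
    (fun count i =>
      if (PySem.Set.ofList (["i", "me", "my", "myself", "mine"] : List String)).contains (PySem.Str.lower i)
      then count + 1 else count) 0

-- ===== PORT B =====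
def count_firstperson_alt (text : String) : Int :=
  (["i", "me", "my", "myself", "mine"] : List String).foldl
    (fun a p => a +
      ((PySem.Str.split₀ text).foldl
        (fun d w => let lw := PySem.Str.lower w; d.insert lw (d.getD lw 0 + 1))
        PySem.Dict.empty).getD p 0) 0

-- ===== PRECONDITION & SPEC =====
def Spec_count_firstperson (text : String) (out : Int) : Prop := out = count_firstperson_alt text
instance (text : String) (out : Int) : Decidable (Spec_count_firstperson text out) := by unfold Spec_count_firstperson; infer_instance

-- ===== CLAIM (what is proved, stated in full; the proofs are below) =====
def Claim_equal_count_firstperson : Prop := ∀ (text : String), Dom_count_firstperson text → Spec_count_firstperson text (count_firstperson text)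

-- ===== LEMMAS AND PROOFS =====

lemma cf_aux (L : List String) (c : Int) :
    L.foldl (fun count w =>
      if (PySem.Set.ofList (["i", "me", "my", "myself", "mine"] : List String)).contains w
      then count + 1 else count) c
    = c + L.count "i" + L.count "me" + L.count "my" + L.count "myself" + L.count "mine" := by
  induction L generalizing c with
  | nil => simp
  | cons w L ih =>
    simp only [List.foldl_cons, ih, List.count_cons]
    by_cases h : w ∈ (["i", "me", "my", "myself", "mine"] : List String)
    · simp only [List.mem_cons, List.not_mem_nil, or_false] at h
      rcases h with h | h | h | h | h <;> subst h <;> (simp; ring)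
    · have hc : (PySem.Set.ofList (["i", "me", "my", "myself", "mine"] : List String)).contains w = false := by
        simp [PySem.Set.mem_ofList] at h ⊢
        tauto
      simp only [hc]
      simp at h
      obtain ⟨h1, h2, h3, h4, h5⟩ := h
      simp [h1, h2, h3, h4, h5]

-- ===== VERDICT (by name: the statement is the Claim_ definition above) =====
theorem count_firstperson_spec : Claim_equal_count_firstperson := by
  intro text _
  unfold Spec_count_firstperson count_firstperson count_firstperson_alt
  have hcnt :
      (PySem.Str.split₀ text).foldl
        (fun d w => let lw := PySem.Str.lower w; d.insert lw (d.getD lw 0 + 1)) PySem.Dict.empty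
      = PySem.Dict.counter ((PySem.Str.split₀ text).map PySem.Str.lower) := by
    rw [← PySem.Dict.foldl_insert_getD_add_one_eq_counter, List.foldl_map]
  rw [hcnt]
  have haux := cf_aux ((PySem.Str.split₀ text).map PySem.Str.lower) 0
  rw [List.foldl_map] at haux
  rw [haux]
  simp [PySem.Dict.getD_counter, List.foldl_cons]
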